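-- pv_equiv track=rewrite | github.com/peternara/good-pytorch-SimilarityLearning-metric-Semi-Hard-Negative | losses/triplet.py | triplets
-- ===== SOURCE A (Python) =====
-- def triplets(y, distances):
--     anchors, positives, negatives = [], [], []
--     for anchor, y_anchor in enumerate(y):
--         for positive, y_positive in enumerate(y):
--             # if same embedding or different labels, skip
--             if (anchor == positive) or (y_anchor != y_positive):
--                 continue
--             for negative, y_negative in enumerate(y):
--                 if y_negative == y_anchor:
--                     continue
--                 anchors.append(anchor)
--                 positives.append(positive)
--                 negatives.append(negative)
--     return anchors, positives, negatives
-- ===== SOURCE B (Python) =====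
-- def triplets(y, distances):
--     # group indices by label once, and build each label's negative-index list once
--     groups = {}
--     for i, label in enumerate(y):
--         groups[label] = groups.get(label, []) + [i]
--     neg = {}
--     for label in groups:
--         neg[label] = [j for j, lj in enumerate(y) if lj != label]
--     anchors, positives, negatives = [], [], []
--     for i, label in enumerate(y):
--         negs = neg[label]
--         k = len(negs)
--         for p in groups[label]:
--             if p != i:
--                 anchors.extend([i] * k)
--                 positives.extend([p] * k)
--                 negatives.extend(negs)
--     return anchors, positives, negatives
-- ===== Notes on version B (the rewrite author's own statement) =====
-- stated objective: faster
-- what changed: B builds a label->indices dict and a per-label negative-index list once and then emits each anchor's triplets by extending with precomputed blocks, instead of A's triple nested scan over all n^3 index combinations.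
import Mathlib
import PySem

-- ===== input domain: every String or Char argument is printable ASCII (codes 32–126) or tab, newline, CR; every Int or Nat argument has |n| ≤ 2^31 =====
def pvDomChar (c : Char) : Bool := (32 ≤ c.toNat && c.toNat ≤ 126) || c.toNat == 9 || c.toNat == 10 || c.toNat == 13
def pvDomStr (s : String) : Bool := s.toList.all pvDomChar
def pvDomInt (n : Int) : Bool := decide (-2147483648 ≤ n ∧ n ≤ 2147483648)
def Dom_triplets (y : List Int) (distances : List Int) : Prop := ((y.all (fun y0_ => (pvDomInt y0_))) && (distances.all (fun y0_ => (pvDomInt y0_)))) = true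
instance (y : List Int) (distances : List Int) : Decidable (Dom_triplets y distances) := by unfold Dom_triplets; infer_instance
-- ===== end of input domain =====

-- B groups indices by label once and reuses each label's negative list, instead of A's
-- triple nested scan; objective: faster (removes the per-anchor inner scans).

-- ===== PORT A =====
def triplets (y : List Int) (distances : List Int) : List Int × List Int × List Int :=
  (PySem.List.enumerate y).foldl (fun acc a =>
    (PySem.List.enumerate y).foldl (fun acc2 p =>
      if a.1 == p.1 || a.2 != p.2 then acc2
      else (PySem.List.enumerate y).foldl (fun acc3 m =>
        if m.2 == a.2 then acc3
        else (acc3.1 ++ [a.1], acc3.2.1 ++ [p.1], acc3.2.2 ++ [m.1])) acc2) acc)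
    ([], [], [])

-- ===== PORT B =====
def triplets_alt (y : List Int) (distances : List Int) : List Int × List Int × List Int :=
  let groups : PySem.Dict Int (List Int) :=
    (PySem.List.enumerate y).foldl (fun d p => d.modify p.2 [] (· ++ [p.1])) PySem.Dict.empty
  let neg : PySem.Dict Int (List Int) :=
    groups.keys.foldl (fun d label =>
      d.insert label (((PySem.List.enumerate y).filter (fun q => q.2 != label)).map (·.1)))
      PySem.Dict.empty
  (PySem.List.enumerate y).foldl (fun acc p =>
    let negs := neg.getD p.2 []
    let k := negs.length
    (groups.getD p.2 []).foldl (fun acc2 q =>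
      if q != p.1 then
        (acc2.1 ++ List.replicate k p.1, acc2.2.1 ++ List.replicate k q, acc2.2.2 ++ negs)
      else acc2) acc) ([], [], [])

-- ===== PRECONDITION & SPEC =====
def Spec_triplets (y : List Int) (distances : List Int) (out : List Int × List Int × List Int) : Prop := out = triplets_alt y distances
instance (y : List Int) (distances : List Int) (out : List Int × List Int × List Int) : Decidable (Spec_triplets y distances out) := by unfold Spec_triplets; infer_instance

-- ===== CLAIM (what is proved, stated in full; the proofs are below) =====
def Claim_equal_triplets : Prop := ∀ (y : List Int) (distances : List Int), Dom_triplets y distances → Spec_triplets y distances (triplets y distances)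

-- ===== LEMMAS AND PROOFS =====

-- skip-form of a guarded fold ('if c: continue') as a fold over the complementary filter
theorem foldl_skip_eq_foldl_filter {α β : Type} (p : α → Bool) (f : β → α → β)
    (l : List α) (init : β) :
    l.foldl (fun acc x => if p x then acc else f acc x) init
      = (l.filter (fun x => !p x)).foldl f init := by
  rw [← PySem.List.foldl_if_eq_foldl_filter (fun x => !p x) f l init]
  exact PySem.List.foldl_congr_mem l _ _ init
    (by intro acc x _; cases h : p x <;> simp)

-- A's innermost loop, written out: three parallel appends per surviving negative
theorem triple_fold (l : List (Int × Int)) (p : Int × Int → Bool) (a b : Int)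
    (acc : List Int × List Int × List Int) :
    l.foldl (fun acc3 m => if p m then acc3
        else (acc3.1 ++ [a], acc3.2.1 ++ [b], acc3.2.2 ++ [m.1])) acc
      = (acc.1 ++ List.replicate ((l.filter (fun m => !p m)).length) a,
         acc.2.1 ++ List.replicate ((l.filter (fun m => !p m)).length) b,
         acc.2.2 ++ (l.filter (fun m => !p m)).map (·.1)) := by
  induction l generalizing acc with
  | nil => simp
  | cons x xs ih =>
    cases h : p x <;>
      simp [h, List.foldl_cons, ih, List.replicate_succ, List.append_assoc]

-- the grouping dict looked up at any label is the label's index list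
theorem groups_getD (y : List Int) (l : Int) :
    ((PySem.List.enumerate y).foldl (fun d p => d.modify p.2 [] (· ++ [p.1]))
        PySem.Dict.empty).getD l []
      = ((PySem.List.enumerate y).filter (fun q => q.2 == l)).map (·.1) := by
  have h1 : (PySem.List.enumerate y).foldl (fun d p => d.modify p.2 [] (· ++ [p.1]))
      PySem.Dict.empty
      = ((PySem.List.enumerate y).map Prod.swap).foldl
          (fun d p => d.modify p.1 [] (· ++ [p.2])) PySem.Dict.empty := by
    rw [List.foldl_map]
    rfl
  rw [h1, PySem.Dict.getD_foldl_modify_append]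
  simp [List.filter_map, List.map_map]
  rfl

-- a fold inserting a key-determined value, looked up at an inserted key
theorem getD_foldl_insert_fn {κ ν : Type} [BEq κ] [LawfulBEq κ] [DecidableEq κ]
    (ks : List κ) (f : κ → ν) (d : PySem.Dict κ ν) (d0 : ν) (l : κ) (h : l ∈ ks) :
    (ks.foldl (fun d k => d.insert k (f k)) d).getD l d0 = f l := by
  induction ks generalizing d with
  | nil => cases h
  | cons k ks ih =>
    by_cases hm : l ∈ ks
    · exact ih _ hm
    · have hl : l = k := by
        rcases List.mem_cons.mp h with h' | h'
        · exact h'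
        · exact absurd h' hm
      subst hl
      have aux : ∀ (ks' : List κ), l ∉ ks' → ∀ (d' : PySem.Dict κ ν),
          (ks'.foldl (fun d k => d.insert k (f k)) d').getD l d0 = d'.getD l d0 := by
        intro ks' hn
        induction ks' with
        | nil => intro d'; rfl
        | cons a as ih2 =>
          intro d'
          have hne : l ≠ a := fun he => hn (he ▸ List.mem_cons_self)
          rw [List.foldl_cons, ih2 (fun hx => hn (List.mem_cons_of_mem _ hx)),
            PySem.Dict.getD_insert]
          simp [hne]
      rw [List.foldl_cons, aux ks hm, PySem.Dict.getD_insert]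
      simp

-- any label occurring in y is a key of the grouping dict
theorem mem_keys_groups (y : List Int) (p : Int × Int) (hp : p ∈ PySem.List.enumerate y) :
    p.2 ∈ ((PySem.List.enumerate y).foldl (fun d q => d.modify q.2 [] (· ++ [q.1]))
      PySem.Dict.empty).keys := by
  have h := PySem.Dict.keys_foldl_modify_key (l := PySem.List.enumerate y)
    (key := fun q => (q.2 : Int)) (d0 := ([] : List Int))
    (f := fun (d : PySem.Dict Int (List Int)) (q : Int × Int) => (· ++ [q.1]))
    (d := PySem.Dict.empty)
  rw [h]
  have : p.2 ∈ (PySem.List.enumerate y).map (fun q => q.2) := List.mem_map_of_mem hp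
  have h2 : (PySem.Dict.empty : PySem.Dict Int (List Int)).keys = ([] : List Int) := rfl
  rw [h2]
  exact (PySem.Set.mem_update _ _ _).mpr (Or.inr this)

-- ===== VERDICT (by name: the statement is the Claim_ definition above) =====
theorem triplets_spec : Claim_equal_triplets := by
  intro y distances _
  unfold Spec_triplets triplets triplets_alt
  dsimp only
  apply PySem.List.foldl_congr_mem
  intro acc p hp
  rw [groups_getD]
  rw [getD_foldl_insert_fn _ _ _ _ _ (mem_keys_groups y p hp)]
  rw [foldl_skip_eq_foldl_filter
    (fun q : Int × Int => p.1 == q.1 || p.2 != q.2)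
    (fun acc2 (q : Int × Int) => (PySem.List.enumerate y).foldl (fun acc3 m =>
      if m.2 == p.2 then acc3
      else (acc3.1 ++ [p.1], acc3.2.1 ++ [q.1], acc3.2.2 ++ [m.1])) acc2)]
  rw [PySem.List.foldl_if_eq_foldl_filter (fun q : Int => q != p.1)]
  rw [List.filter_map, List.foldl_map]
  rw [List.filter_filter]
  have hfil : (PySem.List.enumerate y).filter (fun q => !(p.1 == q.1 || p.2 != q.2))
      = (PySem.List.enumerate y).filter
          (fun a => ((fun (q : Int) => q != p.1) ∘ (fun (x : Int × Int) => x.1)) a && a.2 == p.2) := by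
    apply List.filter_congr
    intro q _
    simp only [Function.comp, bne, Bool.not_or, Bool.not_not]
    rw [BEq.comm (a := p.1) (b := q.1), BEq.comm (a := p.2) (b := q.2), Bool.and_comm]
  rw [hfil]
  apply PySem.List.foldl_congr_mem
  intro acc2 q _
  rw [triple_fold]
  have hc : ∀ m : Int × Int, (!(m.2 == p.2)) = (m.2 != p.2) := by intro m; simp [bne]
  simp only [hc, List.length_map]
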